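-- pv_equiv track=rewrite | github.com/loganlebanoff/correct_summarization | preprocess_lr.py | limit_to_n_tokens
-- ===== SOURCE A (Python) =====
-- def limit_to_n_tokens(sent_tokens, n):
--     res = []
--     count = 0
--     for sent in sent_tokens:
--         out_sent = []
--         for token in sent:
--             if count < n:
--                 out_sent.append(token)
--                 count += 1
--         if len(out_sent) > 0:
--             res.append(out_sent)
--     return res
-- ===== SOURCE B (Python) =====
-- def limit_to_n_tokens(sent_tokens, n):
--     res = []
--     remaining = n
--     for sent in sent_tokens:
--         if remaining <= 0:
--             break
--         chunk = sent[:remaining]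
--         if chunk:
--             res.append(chunk)
--             remaining -= len(chunk)
--     return res
-- ===== Notes on version B (the rewrite author's own statement) =====
-- stated objective: simpler
-- what changed: Replaces the per-token inner loop and running count with a shrinking integer budget and one slice per sentence, breaking early once the budget is spent.
import Mathlib
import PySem

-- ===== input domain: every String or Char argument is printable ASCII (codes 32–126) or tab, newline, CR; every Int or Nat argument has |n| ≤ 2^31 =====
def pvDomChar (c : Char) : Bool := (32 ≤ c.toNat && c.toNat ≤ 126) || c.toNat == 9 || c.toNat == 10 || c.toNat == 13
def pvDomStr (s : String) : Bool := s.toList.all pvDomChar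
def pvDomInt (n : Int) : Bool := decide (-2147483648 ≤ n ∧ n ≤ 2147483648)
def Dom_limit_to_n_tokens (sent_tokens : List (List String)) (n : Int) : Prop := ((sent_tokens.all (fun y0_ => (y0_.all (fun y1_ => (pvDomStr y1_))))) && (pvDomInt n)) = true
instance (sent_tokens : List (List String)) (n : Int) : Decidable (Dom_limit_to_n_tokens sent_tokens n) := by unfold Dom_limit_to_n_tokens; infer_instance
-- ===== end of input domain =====

-- ===== PORT A =====
-- B replaces A's per-token inner loop and running count with a shrinking budget and one slice per sentence (objective: simpler).
def limit_to_n_tokens (sent_tokens : List (List String)) (n : Int) : List (List String) :=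
  (sent_tokens.foldl (fun (st : List (List String) × Int) sent =>
      let inner := sent.foldl (fun (p : List String × Int) token =>
        if p.2 < n then (p.1 ++ [token], p.2 + 1) else p) ([], st.2)
      if inner.1.length > 0 then (st.1 ++ [inner.1], inner.2) else (st.1, inner.2))
    ([], 0)).1

-- ===== PORT B =====
def limit_to_n_tokens_alt (sent_tokens : List (List String)) (n : Int) : List (List String) :=
  match sent_tokens with
  | [] => []
  | sent :: rest =>
    if n ≤ 0 then []          -- `break` once the budget is spent
    else
      let chunk := sent.take n.toNat   -- sent[:remaining], remaining > 0 here
      if chunk.isEmpty then limit_to_n_tokens_alt rest n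
      else chunk :: limit_to_n_tokens_alt rest (n - chunk.length)

-- ===== PRECONDITION & SPEC =====
def Spec_limit_to_n_tokens (sent_tokens : List (List String)) (n : Int) (out : List (List String)) : Prop := out = limit_to_n_tokens_alt sent_tokens n
instance (sent_tokens : List (List String)) (n : Int) (out : List (List String)) : Decidable (Spec_limit_to_n_tokens sent_tokens n out) := by unfold Spec_limit_to_n_tokens; infer_instance

-- ===== CLAIM (what is proved, stated in full; the proofs are below) =====
def Claim_equal_limit_to_n_tokens : Prop := ∀ (sent_tokens : List (List String)) (n : Int), Dom_limit_to_n_tokens sent_tokens n → Spec_limit_to_n_tokens sent_tokens n (limit_to_n_tokens sent_tokens n)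

-- ===== LEMMAS AND PROOFS =====

lemma inner_eq (n : Int) (s : List String) : ∀ (out : List String) (c : Int),
    s.foldl (fun (p : List String × Int) token =>
      if p.2 < n then (p.1 ++ [token], p.2 + 1) else p) (out, c)
    = (out ++ s.take (n - c).toNat, c + ((s.take (n - c).toNat).length : Int)) := by
  induction s with
  | nil => intro out c; simp
  | cons t s ih =>
    intro out c
    by_cases h : c < n
    · have hk : (n - c).toNat = ((n - (c + 1)).toNat) + 1 := by omega
      simp only [List.foldl_cons, if_pos h, ih, hk, List.take_succ_cons,
        List.append_assoc, List.singleton_append, List.length_cons]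
      rw [Prod.mk.injEq]
      refine ⟨rfl, by push_cast; ring⟩
    · have hk : (n - c).toNat = 0 := by omega
      simp [h, ih, hk]

lemma alt_nonpos (sent_tokens : List (List String)) (n : Int) (h : n ≤ 0) :
    limit_to_n_tokens_alt sent_tokens n = [] := by
  cases sent_tokens with
  | nil => rfl
  | cons s rest => simp [limit_to_n_tokens_alt, h]

lemma outer_eq (n : Int) : ∀ (sents : List (List String)) (acc : List (List String)) (c : Int),
    (sents.foldl (fun (st : List (List String) × Int) sent =>
        let inner := sent.foldl (fun (p : List String × Int) token =>
          if p.2 < n then (p.1 ++ [token], p.2 + 1) else p) ([], st.2)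
        if inner.1.length > 0 then (st.1 ++ [inner.1], inner.2) else (st.1, inner.2))
      (acc, c)).1
    = acc ++ limit_to_n_tokens_alt sents (n - c) := by
  intro sents
  induction sents with
  | nil => intro acc c; simp [limit_to_n_tokens_alt]
  | cons sent rest ih =>
    intro acc c
    rw [List.foldl_cons]
    show (rest.foldl _
      (let inner := sent.foldl (fun (p : List String × Int) token =>
          if p.2 < n then (p.1 ++ [token], p.2 + 1) else p) ([], c)
       if inner.1.length > 0 then (acc ++ [inner.1], inner.2) else (acc, inner.2))).1 = _
    rw [inner_eq]
    set chunk := sent.take (n - c).toNat with hchunk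
    by_cases hc : chunk = []
    · have hlen : chunk.length = 0 := by rw [hc]; rfl
      have halt : limit_to_n_tokens_alt (sent :: rest) (n - c)
          = limit_to_n_tokens_alt rest (n - c) := by
        by_cases hnp : n - c ≤ 0
        · rw [alt_nonpos _ _ hnp, alt_nonpos _ _ hnp]
        · simp only [limit_to_n_tokens_alt, if_neg hnp, ← hchunk]
          simp [List.isEmpty_iff, hc]
      rw [halt]
      simpa [hc, hlen] using ih acc c
    · have hnp : ¬ n - c ≤ 0 := by
        intro h
        apply hc
        rw [hchunk]
        have : (n - c).toNat = 0 := by omega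
        simp [this]
      have hlen : chunk.length > 0 := List.length_pos_iff.mpr hc
      have halt : limit_to_n_tokens_alt (sent :: rest) (n - c)
          = chunk :: limit_to_n_tokens_alt rest ((n - c) - chunk.length) := by
        simp only [limit_to_n_tokens_alt, if_neg hnp, ← hchunk]
        simp [List.isEmpty_iff, hc]
      rw [halt]
      have harith : n - (c + (chunk.length : Int)) = (n - c) - chunk.length := by ring
      simp only [List.nil_append, if_pos hlen]
      rw [ih, harith, List.append_assoc, List.singleton_append]

-- ===== VERDICT (by name: the statement is the Claim_ definition above) =====
theorem limit_to_n_tokens_spec : Claim_equal_limit_to_n_tokens := by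
  intro sent_tokens n _
  unfold Spec_limit_to_n_tokens limit_to_n_tokens
  simpa using outer_eq n sent_tokens [] 0
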